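-- pv_equiv track=rewrite | github.com/asifmahbubnaeem/GAMAUTOMATION-ESPNFLOW | EditParamTest.py | ExtractParamValueUtil
-- ===== SOURCE A (Python) =====
-- def ExtractParamValueUtil(param_variable, urlstr):
-- 	arr = urlstr.split('&')
-- 	tmp_arr=[]
-- 	for item in arr:
-- 		if param_variable+"=" in item:
-- 			tmp_arr = item.split("=")
--
-- 	if len(tmp_arr)>1:
-- 		return tmp_arr[1]
-- 	return ""
-- ===== SOURCE B (Python) =====
-- def ExtractParamValueUtil(param_variable, urlstr):
--     needle = param_variable + "="
--     best = None
--     seg = []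
--     for ch in urlstr:
--         if ch == '&':
--             s = ''.join(seg)
--             if needle in s:
--                 best = s
--             seg = []
--         else:
--             seg.append(ch)
--     s = ''.join(seg)
--     if needle in s:
--         best = s
--     if best is None:
--         return ""
--     _, _, tail = best.partition("=")
--     val, _, _ = tail.partition("=")
--     return val
-- ===== Notes on version B (the rewrite author's own statement) =====
-- stated objective: alternative
-- what changed: Replaces A's split('&') list plus last-match accumulator holding the item's '='-split by a single character-level state machine that assembles segments itself (no split calls), remembers only the last matching segment, and extracts the value with two partition('=') calls at the end.
import Mathlib
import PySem

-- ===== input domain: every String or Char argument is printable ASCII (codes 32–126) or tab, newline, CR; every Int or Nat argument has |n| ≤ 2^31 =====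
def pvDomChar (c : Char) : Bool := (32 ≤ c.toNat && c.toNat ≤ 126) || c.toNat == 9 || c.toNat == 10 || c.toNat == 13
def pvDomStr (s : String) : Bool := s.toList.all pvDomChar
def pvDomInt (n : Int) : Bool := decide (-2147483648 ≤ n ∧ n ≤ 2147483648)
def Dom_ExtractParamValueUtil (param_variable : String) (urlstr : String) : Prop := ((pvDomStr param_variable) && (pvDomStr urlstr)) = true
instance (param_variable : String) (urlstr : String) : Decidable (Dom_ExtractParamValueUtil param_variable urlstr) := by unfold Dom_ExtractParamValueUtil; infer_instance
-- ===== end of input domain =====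

-- B replaces A's split('&')-and-overwrite loop by a character-level state machine (no split calls)
-- that assembles the segments itself, keeps only the last matching segment, and extracts the value
-- with two partition('=') calls: an alternative of the same cost.

-- ===== PORT A =====
def ExtractParamValueUtil (param_variable : String) (urlstr : String) : String :=
  let arr := PySem.Chars.splitOn urlstr.toList ['&']
  let tmp_arr := arr.foldl
    (fun tmp_arr item =>
      if PySem.Chars.isIn (param_variable.toList ++ ['=']) item
      then PySem.Chars.splitOn item ['=']
      else tmp_arr) []
  if tmp_arr.length > 1 then String.ofList (PySem.List.pyGetD tmp_arr 1 []) else ""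

-- ===== PORT B =====
-- hand port of Python str.partition with a ONE-character separator (PySem has no partition):
-- scan for the first occurrence of the separator; (head, found-flag, tail). Exact: Python's
-- partition splits at the first occurrence and returns (s, '', '') when the separator is absent
-- (the flag stands for the middle component being non-empty).
def pvPartition1 (sep : Char) : List Char → List Char × Bool × List Char
  | [] => ([], false, [])
  | c :: t =>
      if c = sep then ([], true, t)
      else
        match pvPartition1 sep t with
        | (h, true, r) => (c :: h, true, r)
        | (_, false, _) => (c :: t, false, [])

-- one iteration of B's loop; the Python 'seg' is a list of characters, joined only to test/store it,
-- which over single characters is the list itself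
def pvStep (needle : List Char) (st : Option (List Char) × List Char) (ch : Char) :
    Option (List Char) × List Char :=
  if ch = '&' then
    (if PySem.Chars.isIn needle st.2 then some st.2 else st.1, [])
  else
    (st.1, st.2 ++ [ch])

def ExtractParamValueUtil_alt (param_variable : String) (urlstr : String) : String :=
  let needle := param_variable.toList ++ ['=']
  let st := urlstr.toList.foldl (pvStep needle) (none, [])
  let best := if PySem.Chars.isIn needle st.2 then some st.2 else st.1
  match best with
  | none => ""
  | some b => String.ofList (pvPartition1 '=' (pvPartition1 '=' b).2.2).1

-- ===== PRECONDITION & SPEC =====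
def Spec_ExtractParamValueUtil (param_variable : String) (urlstr : String) (out : String) : Prop := out = ExtractParamValueUtil_alt param_variable urlstr
instance (param_variable : String) (urlstr : String) (out : String) : Decidable (Spec_ExtractParamValueUtil param_variable urlstr out) := by unfold Spec_ExtractParamValueUtil; infer_instance

-- ===== CLAIM (what is proved, stated in full; the proofs are below) =====
def Claim_equal_ExtractParamValueUtil : Prop := ∀ (param_variable : String) (urlstr : String), Dom_ExtractParamValueUtil param_variable urlstr → Spec_ExtractParamValueUtil param_variable urlstr (ExtractParamValueUtil param_variable urlstr)

-- ===== LEMMAS AND PROOFS =====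

-- structural model of Python's s.split(a) for a one-character separator
def pvSplit1 (a : Char) : List Char → List (List Char)
  | [] => [[]]
  | c :: t =>
      if c = a then [] :: pvSplit1 a t
      else
        match pvSplit1 a t with
        | [] => [[c]]
        | h :: r => (c :: h) :: r

theorem pvSplit1_ne_nil (a : Char) (s : List Char) : pvSplit1 a s ≠ [] := by
  cases s with
  | nil => simp [pvSplit1]
  | cons c t =>
      simp only [pvSplit1]
      split_ifs
      · simp
      · cases h : pvSplit1 a t <;> simp

-- prepend a prefix to the first segment
def pvPre (p : List Char) : List (List Char) → List (List Char)
  | [] => [p]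
  | h :: r => (p ++ h) :: r

theorem pvPre_nil {xs : List (List Char)} (h : xs ≠ []) : pvPre [] xs = xs := by
  cases xs with
  | nil => exact absurd rfl h
  | cons a t => simp [pvPre]

theorem pv_go (a : Char) : ∀ (fuel : Nat) (l : List Char), l.length < fuel →
    ∀ (cur : List Char) (acc : List (List Char)),
    PySem.Chars.splitOn.go [a] fuel l cur acc = acc.reverse ++ pvPre cur.reverse (pvSplit1 a l) := by
  intro fuel
  induction fuel with
  | zero => intro l h; omega
  | succ f ih =>
    intro l h cur acc
    cases l with
    | nil =>
        rw [PySem.Chars.splitOn.go.eq_2 _ _ _ _ (by simp)]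
        simp [pvSplit1, pvPre]
    | cons c rest =>
        rw [PySem.Chars.splitOn.go.eq_3]
        by_cases hc : c = a
        · have hpre : List.isPrefixOf [a] (c :: rest) = true := by
            simp [List.isPrefixOf, hc]
          rw [if_pos hpre]
          have hlen : rest.length < f := by simpa using Nat.lt_of_succ_lt_succ h
          simp only [List.length_cons, List.length_nil, List.drop_succ_cons, List.drop_zero]
          rw [ih rest hlen [] (cur.reverse :: acc)]
          obtain ⟨y, r, hyr⟩ : ∃ y r, pvSplit1 a rest = y :: r := by
            cases hs : pvSplit1 a rest with
            | nil => exact absurd hs (pvSplit1_ne_nil a rest)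
            | cons y r => exact ⟨y, r, rfl⟩
          simp [pvSplit1, hc, hyr, pvPre]
        · have hpre : List.isPrefixOf [a] (c :: rest) = false := by
            simp [List.isPrefixOf]
            exact fun hh => absurd hh.symm hc
          rw [if_neg (by simp [hpre])]
          have hlen : rest.length < f := by simpa using Nat.lt_of_succ_lt_succ h
          rw [ih rest hlen (c :: cur) acc]
          obtain ⟨y, r, hyr⟩ : ∃ y r, pvSplit1 a rest = y :: r := by
            cases hs : pvSplit1 a rest with
            | nil => exact absurd hs (pvSplit1_ne_nil a rest)
            | cons y r => exact ⟨y, r, rfl⟩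
          simp [pvSplit1, hc, hyr, pvPre]

theorem pv_splitOn_single (a : Char) (s : List Char) :
    PySem.Chars.splitOn s [a] = pvSplit1 a s := by
  unfold PySem.Chars.splitOn
  rw [pv_go a (s.length + 1) s (by omega) [] []]
  simp [pvPre_nil (pvSplit1_ne_nil a s)]

-- the update A's loop performs, expressed on the matched item itself
def pvUpd (needle : List Char) (b : Option (List Char)) (seg : List Char) : Option (List Char) :=
  if PySem.Chars.isIn needle seg then some seg else b

-- last element with default, structurally
def pvLastD (d : List Char) : List (List Char) → List Char
  | [] => d
  | [x] => x
  | _ :: y :: r => pvLastD d (y :: r)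

theorem pvLastD_cons_of_ne (d x) {t : List (List Char)} (h : t ≠ []) :
    pvLastD d (x :: t) = pvLastD d t := by
  cases t with
  | nil => exact absurd rfl h
  | cons y r => rfl

theorem pv_decomp (d : List Char) : ∀ (xs : List (List Char)), xs ≠ [] →
    xs.dropLast ++ [pvLastD d xs] = xs := by
  intro xs
  induction xs with
  | nil => intro h; exact absurd rfl h
  | cons x t ih =>
      intro _
      cases t with
      | nil => rfl
      | cons y r =>
          have := ih (by simp)
          simp only [pvLastD, List.dropLast_cons₂, List.cons_append]
          rw [this]

-- B's loop, characterized on the segment decomposition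
theorem pv_machine (needle : List Char) : ∀ (l : List Char) (b : Option (List Char)) (s : List Char),
    l.foldl (pvStep needle) (b, s) =
      ((pvPre s (pvSplit1 '&' l)).dropLast.foldl (pvUpd needle) b,
       pvLastD [] (pvPre s (pvSplit1 '&' l))) := by
  intro l
  induction l with
  | nil =>
      intro b s
      simp [pvSplit1, pvPre, pvLastD]
  | cons c t ih =>
      intro b s
      simp only [List.foldl_cons, pvStep]
      by_cases hc : c = '&'
      · rw [if_pos hc, ih]
        subst hc
        obtain ⟨y, r, hyr⟩ : ∃ y r, pvSplit1 '&' t = y :: r := by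
          cases hs : pvSplit1 '&' t with
          | nil => exact absurd hs (pvSplit1_ne_nil _ t)
          | cons y r => exact ⟨y, r, rfl⟩
        have h1 : pvSplit1 '&' ('&' :: t) = [] :: y :: r := by
          simp [pvSplit1, hyr]
        rw [h1]
        simp only [pvPre, List.append_nil]
        rw [List.dropLast_cons₂, pvLastD_cons_of_ne _ _ (by simp)]
        simp [pvUpd, hyr]
      · rw [if_neg hc, ih]
        obtain ⟨y, r, hyr⟩ : ∃ y r, pvSplit1 '&' t = y :: r := by
          cases hs : pvSplit1 '&' t with
          | nil => exact absurd hs (pvSplit1_ne_nil _ t)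
          | cons y r => exact ⟨y, r, rfl⟩
        simp [pvSplit1, hc, hyr, pvPre]

-- A's loop keeps the '='-split of the last matching item; pvUpd keeps the item itself
def pvTmp (b : Option (List Char)) : List (List Char) :=
  match b with
  | none => []
  | some i => PySem.Chars.splitOn i ['=']

theorem pv_fold_tmp (needle : List Char) : ∀ (arr : List (List Char)) (b : Option (List Char)),
    arr.foldl (fun tmp_arr item => if PySem.Chars.isIn needle item
        then PySem.Chars.splitOn item ['='] else tmp_arr) (pvTmp b)
      = pvTmp (arr.foldl (pvUpd needle) b) := by
  intro arr
  induction arr with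
  | nil => intro b; rfl
  | cons item rest ih =>
      intro b
      simp only [List.foldl_cons]
      by_cases hi : PySem.Chars.isIn needle item = true
      · rw [if_pos hi]
        have : PySem.Chars.splitOn item ['='] = pvTmp (some item) := rfl
        rw [this, ih (some item)]
        simp [pvUpd, hi]
      · rw [if_neg hi]
        rw [ih b]
        simp [pvUpd, hi]

theorem pv_fold_some (needle : List Char) : ∀ (l : List (List Char)) (b : Option (List Char)) (i : List Char),
    l.foldl (pvUpd needle) b = some i → PySem.Chars.isIn needle i = true ∨ b = some i := by
  intro l
  induction l with
  | nil => intro b i h; right; exact h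
  | cons x t ih =>
      intro b i h
      simp only [List.foldl_cons] at h
      rcases ih _ _ h with hin | hb
      · left; exact hin
      · unfold pvUpd at hb
        by_cases hx : PySem.Chars.isIn needle x = true
        · rw [if_pos hx] at hb
          left; exact (Option.some_inj.mp hb) ▸ hx
        · rw [if_neg hx] at hb
          right; exact hb

theorem pvPartition1_found (a : Char) : ∀ (s : List Char),
    (pvPartition1 a s).2.1 = true ↔ a ∈ s := by
  intro s
  induction s with
  | nil => simp [pvPartition1]
  | cons c t ih =>
      by_cases hc : c = a
      · simp [pvPartition1, hc]
      · have hca : ¬ a = c := fun hh => hc hh.symm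
        cases hp : pvPartition1 a t with
        | mk h fr =>
            cases fr with
            | mk f r =>
                cases f with
                | true =>
                    simp only [pvPartition1, if_neg hc, hp]
                    simp only [hp] at ih
                    simp only [List.mem_cons, hca, false_or]
                    simp only [true_iff] at ih ⊢
                    exact ih
                | false =>
                    simp only [pvPartition1, if_neg hc, hp]
                    simp only [hp] at ih
                    simp [List.mem_cons, ih, hca]

theorem pvPartition1_split (a : Char) : ∀ (s : List Char), (pvPartition1 a s).2.1 = true →
    pvSplit1 a s = (pvPartition1 a s).1 :: pvSplit1 a (pvPartition1 a s).2.2 := by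
  intro s
  induction s with
  | nil => intro h; simp [pvPartition1] at h
  | cons c t ih =>
      intro hf
      by_cases hc : c = a
      · simp [pvPartition1, pvSplit1, hc]
      · cases hp : pvPartition1 a t with
        | mk h fr =>
            cases fr with
            | mk f r =>
                cases f with
                | true =>
                    have ht := ih (by rw [hp])
                    rw [hp] at ht
                    simp only [pvPartition1, if_neg hc, hp, pvSplit1, ht]
                | false =>
                    simp only [pvPartition1, if_neg hc, hp] at hf
                    simp at hf

theorem pvPartition1_notfound (a : Char) : ∀ (s : List Char), (pvPartition1 a s).2.1 = false →
    (pvPartition1 a s).1 = s := by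
  intro s
  induction s with
  | nil => intro _; rfl
  | cons c t ih =>
      intro hf
      by_cases hc : c = a
      · simp [pvPartition1, hc] at hf
      · cases hp : pvPartition1 a t with
        | mk h fr =>
            cases fr with
            | mk f r =>
                cases f with
                | true => simp only [pvPartition1, if_neg hc, hp] at hf; simp at hf
                | false => simp only [pvPartition1, if_neg hc, hp]

theorem pvSplit1_notfound (a : Char) : ∀ (s : List Char), a ∉ s → pvSplit1 a s = [s] := by
  intro s
  induction s with
  | nil => intro _; rfl
  | cons c t ih =>
      intro hs
      have hc : ¬ c = a := fun hh => hs (by simp [hh])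
      have ht := ih (fun hm => hs (List.mem_cons_of_mem _ hm))
      simp [pvSplit1, hc, ht]

theorem pvSplit1_head (a : Char) (s : List Char) :
    ∃ r, pvSplit1 a s = (pvPartition1 a s).1 :: r := by
  by_cases hf : (pvPartition1 a s).2.1 = true
  · exact ⟨pvSplit1 a (pvPartition1 a s).2.2, pvPartition1_split a s hf⟩
  · have hv := pvPartition1_notfound a s (by simpa using hf)
    have hmem : a ∉ s := fun hm => hf ((pvPartition1_found a s).mpr hm)
    exact ⟨[], by rw [pvSplit1_notfound a s hmem, hv]⟩

-- the value A extracts from a matched item equals B's two-partition extraction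
theorem pv_extract (item : List Char) (hm : '=' ∈ item) :
    (if (pvSplit1 '=' item).length > 1
     then String.ofList (PySem.List.pyGetD (pvSplit1 '=' item) 1 []) else "")
      = String.ofList (pvPartition1 '=' (pvPartition1 '=' item).2.2).1 := by
  have hf : (pvPartition1 '=' item).2.1 = true := (pvPartition1_found '=' item).mpr hm
  have hsp := pvPartition1_split '=' item hf
  obtain ⟨r, hr⟩ := pvSplit1_head '=' (pvPartition1 '=' item).2.2
  rw [hsp, hr]
  simp [PySem.List.pyGetD]

-- ===== VERDICT (by name: the statement is the Claim_ definition above) =====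
theorem ExtractParamValueUtil_spec : Claim_equal_ExtractParamValueUtil := by
  intro p u _
  unfold Spec_ExtractParamValueUtil ExtractParamValueUtil ExtractParamValueUtil_alt
  simp only [pv_machine (p.toList ++ ['=']) u.toList none [],
    pvPre_nil (pvSplit1_ne_nil '&' u.toList)]
  rw [pv_splitOn_single '&' u.toList]
  have hA := pv_fold_tmp (p.toList ++ ['=']) (pvSplit1 '&' u.toList) none
  simp only [pvTmp] at hA
  rw [hA]
  have hbest :
      (if PySem.Chars.isIn (p.toList ++ ['=']) (pvLastD [] (pvSplit1 '&' u.toList)) = true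
       then some (pvLastD [] (pvSplit1 '&' u.toList))
       else (pvSplit1 '&' u.toList).dropLast.foldl (pvUpd (p.toList ++ ['='])) none)
        = (pvSplit1 '&' u.toList).foldl (pvUpd (p.toList ++ ['='])) none := by
    conv_rhs => rw [← pv_decomp [] (pvSplit1 '&' u.toList) (pvSplit1_ne_nil '&' u.toList)]
    rw [List.foldl_append]
    simp [pvUpd]
  rw [hbest]
  cases hr : (pvSplit1 '&' u.toList).foldl (pvUpd (p.toList ++ ['='])) none with
  | none => rfl
  | some item =>
      have hin : PySem.Chars.isIn (p.toList ++ ['=']) item = true := by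
        rcases pv_fold_some (p.toList ++ ['=']) (pvSplit1 '&' u.toList) none item hr with h | h
        · exact h
        · simp at h
      have hm : '=' ∈ item := by
        have hinf : (p.toList ++ ['=']) <:+: item :=
          (PySem.Chars.isIn_iff_infix _ _).mp hin
        exact hinf.subset (by simp)
      show (if (PySem.Chars.splitOn item ['=']).length > 1
            then String.ofList (PySem.List.pyGetD (PySem.Chars.splitOn item ['=']) 1 []) else "")
          = String.ofList (pvPartition1 '=' (pvPartition1 '=' item).2.2).1
      rw [pv_splitOn_single '=' item]
      exact pv_extract item hm
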